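-- pv_equiv track=rewrite | github.com/nachikeat3299/programmers_coding_practice | level_1/24Q.py | solution
-- ===== SOURCE A (Python) =====
-- def solution(n):
--     answer = 0
--     s = str(n)
--     digit_list = list()
--     for c in s:
--         digit_list.append(int(c))
--
--     # digit_list.sort(reverse=True)
--     digit_list.sort()
--     for i in range(len(digit_list)):
--         answer += digit_list[i] * 10 ** i
--
--
--     return answer
-- ===== SOURCE B (Python) =====
-- def solution(n):
--     counts = [0] * 10
--     for c in str(n):
--         counts[int(c)] += 1
--     answer = 0
--     for d in range(9, -1, -1):
--         for _ in range(counts[d]):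
--             answer = answer * 10 + d
--     return answer
-- ===== Notes on version B (the rewrite author's own statement) =====
-- stated objective: alternative
-- what changed: B replaces the comparison sort plus positional power sum (sum of digit[i]*10**i over the ascending-sorted digit list) by a counting-sort bucket array over the ten possible digits and a single Horner accumulation (answer = answer*10 + d) emitting the digits from highest to lowest.
import Mathlib
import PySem

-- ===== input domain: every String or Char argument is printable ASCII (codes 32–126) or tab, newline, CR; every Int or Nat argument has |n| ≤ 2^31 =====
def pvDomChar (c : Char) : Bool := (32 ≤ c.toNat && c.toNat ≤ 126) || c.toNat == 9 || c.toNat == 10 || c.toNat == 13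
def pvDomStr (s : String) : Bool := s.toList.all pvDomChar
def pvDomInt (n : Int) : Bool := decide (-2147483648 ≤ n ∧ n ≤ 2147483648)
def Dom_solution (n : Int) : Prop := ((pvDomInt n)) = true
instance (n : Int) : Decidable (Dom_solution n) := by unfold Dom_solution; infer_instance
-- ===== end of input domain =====

-- B replaces A's comparison sort + positional power sum by counting-sort buckets over the
-- ten digits and a single Horner accumulation from digit 9 down to 0 (objective: alternative).

-- ===== PORT A =====
def solution (n : Int) : Int :=
  let s := PySem.Int.toChars n
  -- int(c): exact on Pre_ (n ≥ 0, so every character of str(n) is a digit; on '-' Python raises)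
  let digit_list := s.foldl (fun acc c => acc ++ [(PySem.Int.ofChars? [c]).getD 0]) ([] : List Int)
  let sorted_list := PySem.List.sorted digit_list (fun x => x) false
  -- 10 ** i: i ranges over range(len), hence nonnegative, so 10 ^ i.toNat is exact
  (PySem.List.pyRange 0 (PySem.List.len sorted_list) 1).foldl
    (fun answer i => answer + PySem.List.pyGetD sorted_list i 0 * 10 ^ i.toNat) 0

-- ===== PORT B =====
def solution_alt (n : Int) : Int :=
  let counts := (PySem.Int.toChars n).foldl
    (fun counts c =>
      PySem.List.pySetD counts ((PySem.Int.ofChars? [c]).getD 0)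
        (PySem.List.pyGetD counts ((PySem.Int.ofChars? [c]).getD 0) 0 + 1))
    (List.replicate 10 (0 : Int))
  (PySem.List.pyRange 9 (-1) (-1)).foldl
    (fun answer d =>
      (PySem.List.pyRange 0 (PySem.List.pyGetD counts d 0) 1).foldl
        (fun answer _ => answer * 10 + d) answer) 0

-- ===== PRECONDITION & SPEC =====
-- Pre_ excludes negative n, on which Python's int('-') raises ValueError in both A and B.
def Pre_solution (n : Int) : Prop := 0 ≤ n
instance (n : Int) : Decidable (Pre_solution n) := by unfold Pre_solution; infer_instance
def pvWitness_solution : Int := (118372)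

def Spec_solution (n : Int) (out : Int) : Prop := out = solution_alt n
instance (n : Int) (out : Int) : Decidable (Spec_solution n out) := by unfold Spec_solution; infer_instance

-- ===== CLAIM (what is proved, stated in full; the proofs are below) =====
def Claim_equal_solution : Prop := ∀ (n : Int), Dom_solution n → Pre_solution n → Spec_solution n (solution n)

-- ===== LEMMAS AND PROOFS =====

-- the value Python's int() gives a single character (0 for non-digits; only digits occur under Pre_)
def digitVal (c : Char) : Int := (PySem.Int.ofChars? [c]).getD 0

-- Horner evaluation of a digit list, most significant first
def horner (l : List Int) (a : Int) : Int := l.foldl (fun a d => a * 10 + d) a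

-- descending concatenation of buckets: digits k-1, k-2, ..., 0, each repeated cnt j times
def buildDesc (cnt : Nat -> Nat) : Nat -> List Int
  | 0 => []
  | k + 1 => List.replicate (cnt k) ((k : Nat) : Int) ++ buildDesc cnt k

theorem horner_append (l1 l2 : List Int) (a : Int) :
    horner (l1 ++ l2) a = horner l2 (horner l1 a) := by
  simp [horner, List.foldl_append]

theorem horner_shift (l : List Int) (a : Int) :
    horner l a = a * 10 ^ l.length + horner l 0 := by
  induction l generalizing a with
  | nil => simp [horner]
  | cons d t ih =>
      simp only [horner, List.foldl_cons, List.length_cons]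
      rw [show (List.foldl (fun a d => a * 10 + d) (a * 10 + d) t) = horner t (a * 10 + d) from rfl,
          ih (a * 10 + d), show (List.foldl (fun a d => a * 10 + d) (0 * 10 + d) t) = horner t (0 * 10 + d) from rfl,
          ih (0 * 10 + d)]
      ring

-- every character of Nat.toDigits 10 m is Nat.digitChar of some k < 10
theorem mem_toDigitsCore (f m : Nat) : ∀ (acc : List Char) (c : Char),
    c ∈ Nat.toDigitsCore 10 f m acc -> c ∈ acc ∨ ∃ k, k < 10 ∧ c = Nat.digitChar k := by
  induction f generalizing m with
  | zero => intro acc c h; exact Or.inl h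
  | succ f ih =>
      intro acc c h
      simp only [Nat.toDigitsCore] at h
      by_cases h10 : m / 10 = 0
      · simp only [h10] at h
        rcases List.mem_cons.mp h with h | h
        · exact Or.inr ⟨m % 10, Nat.mod_lt _ (by norm_num), h⟩
        · exact Or.inl h
      · rw [if_neg h10] at h
        rcases ih (m / 10) _ c h with h | h
        · rcases List.mem_cons.mp h with h | h
          · exact Or.inr ⟨m % 10, Nat.mod_lt _ (by norm_num), h⟩
          · exact Or.inl h
        · exact Or.inr h

theorem digitVal_digitChar (k : Nat) (hk : k < 10) :
    digitVal (Nat.digitChar k) = (k : Int) ∧ 0 ≤ (k : Int) ∧ (k : Int) < 10 := by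
  interval_cases k <;> exact ⟨by decide, by decide, by decide⟩

theorem ds_bound (n : Int) : ∀ x ∈ (PySem.Int.toChars n).map digitVal, 0 ≤ x ∧ x < 10 := by
  intro x hx
  rcases List.mem_map.mp hx with ⟨c, hc, rfl⟩
  have hdig : c = '-' ∨ ∃ k, k < 10 ∧ c = Nat.digitChar k := by
    unfold PySem.Int.toChars at hc
    by_cases hn : n < 0
    · rw [if_pos hn] at hc
      rcases List.mem_cons.mp hc with h | h
      · exact Or.inl h
      · rcases mem_toDigitsCore _ _ _ _ h with h | h
        · simp at h
        · exact Or.inr h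
    · rw [if_neg hn] at hc
      rcases mem_toDigitsCore _ _ _ _ hc with h | h
      · simp at h
      · exact Or.inr h
  rcases hdig with rfl | ⟨k, hk, rfl⟩
  · exact ⟨by decide, by decide⟩
  · rcases digitVal_digitChar k hk with ⟨h1, h2, h3⟩
    rw [h1]; exact ⟨h2, h3⟩

-- counts after B's first loop
theorem counts_spec (l : List Int) (hl : ∀ x ∈ l, 0 ≤ x ∧ x < 10) :
    ∀ (cnts : List Int), cnts.length = 10 ->
      (l.foldl (fun counts d => PySem.List.pySetD counts d (PySem.List.pyGetD counts d 0 + 1)) cnts).length = 10 ∧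
      ∀ j : Nat, j < 10 ->
        (l.foldl (fun counts d => PySem.List.pySetD counts d (PySem.List.pyGetD counts d 0 + 1)) cnts).getD j 0
          = cnts.getD j 0 + (l.count ((j : Nat) : Int) : Int) := by
  induction l with
  | nil => intro cnts hlen; exact ⟨hlen, by simp⟩
  | cons d t ih =>
      intro cnts hlen
      rcases hl d (List.mem_cons_self) with ⟨hd0, hd10⟩
      have hstep : PySem.List.pySetD cnts d (PySem.List.pyGetD cnts d 0 + 1)
          = cnts.set d.toNat (cnts.getD d.toNat 0 + 1) := by
        rw [PySem.List.pySetD_of_nonneg _ _ hd0,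
            PySem.List.pyGetD_eq_getElem cnts 0 hd0 (by omega),
            List.getD_eq_getElem cnts 0 (by omega)]
      have hlen' : (cnts.set d.toNat (cnts.getD d.toNat 0 + 1)).length = 10 := by
        simp [hlen]
      have ht : ∀ x ∈ t, 0 ≤ x ∧ x < 10 := fun x hx => hl x (List.mem_cons_of_mem _ hx)
      rcases ih ht (cnts.set d.toNat (cnts.getD d.toNat 0 + 1)) hlen' with ⟨hL, hG⟩
      refine ⟨by simpa [List.foldl_cons, hstep] using hL, ?_⟩
      intro j hj
      rw [List.foldl_cons, hstep, hG j hj]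
      by_cases hjd : j = d.toNat
      · subst hjd
        have hji : ((d.toNat : Nat) : Int) = d := by omega
        have h1 : (cnts.set d.toNat (cnts.getD d.toNat 0 + 1)).getD d.toNat 0
            = cnts.getD d.toNat 0 + 1 := by
          rw [List.getD_eq_getElem _ 0 (by simp; omega), List.getElem_set_self]
        rw [List.count_cons, hji, h1]
        simp
        ring_nf
      · have hne : (d == ((j : Nat) : Int)) = false := by simp; omega
        have h1 : (cnts.set d.toNat (cnts.getD d.toNat 0 + 1)).getD j 0 = cnts.getD j 0 := by
          rw [List.getD_eq_getElem _ 0 (by simp; omega), List.getElem_set_ne (by omega),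
              ← List.getD_eq_getElem _ 0 (by omega)]
        rw [h1, List.count_cons, hne]
        simp

theorem sum_eq_horner_reverse (u : List Int) :
    (List.range u.length).foldl (fun a k => a + u.getD k 0 * 10 ^ k) 0 = horner u.reverse 0 := by
  induction u using List.reverseRecOn with
  | nil => simp [horner]
  | append_singleton t d ih =>
      rw [List.length_append, List.length_singleton, List.range_succ, List.foldl_append]
      have hcong : (List.range t.length).foldl (fun a k => a + (t ++ [d]).getD k 0 * 10 ^ k) 0
          = (List.range t.length).foldl (fun a k => a + t.getD k 0 * 10 ^ k) 0 := by
        refine PySem.List.foldl_congr_mem _ _ _ _ ?_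
        intro acc k hk
        rw [List.getD_append _ _ _ _ (List.mem_range.mp hk)]
      rw [hcong, ih]
      have hgd : (t ++ [d]).getD t.length 0 = d := by
        rw [List.getD_append_right _ _ _ _ (le_refl _)]
        simp
      rw [List.foldl_cons, List.foldl_nil, hgd, List.reverse_append]
      simp only [List.reverse_singleton, List.singleton_append]
      rw [show horner (d :: t.reverse) 0 = horner t.reverse (0 * 10 + d) from rfl,
          horner_shift t.reverse (0 * 10 + d), List.length_reverse]
      ring

-- elements of buildDesc are nonnegative and below k
theorem mem_buildDesc (cnt : Nat -> Nat) (k : Nat) :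
    ∀ x ∈ buildDesc cnt k, 0 ≤ x ∧ x < (k : Int) := by
  induction k with
  | zero => simp [buildDesc]
  | succ k ih =>
      intro x hx
      rcases List.mem_append.mp hx with h | h
      · rcases List.eq_of_mem_replicate h with rfl
        refine ⟨by positivity, by push_cast; omega⟩
      · rcases ih x h with ⟨h1, h2⟩
        exact ⟨h1, by push_cast; omega⟩

theorem pairwise_buildDesc (cnt : Nat -> Nat) (k : Nat) :
    (buildDesc cnt k).Pairwise (fun a b : Int => b ≤ a) := by
  induction k with
  | zero => simp [buildDesc]
  | succ k ih =>
      rw [buildDesc, List.pairwise_append]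
      refine ⟨List.pairwise_replicate.mpr (by omega), ih, ?_⟩
      intro x hx y hy
      rcases List.eq_of_mem_replicate hx with rfl
      have := (mem_buildDesc cnt k y hy).2
      omega

theorem count_buildDesc (cnt : Nat -> Nat) (k : Nat) (a : Int) :
    (buildDesc cnt k).count a = if 0 ≤ a ∧ a < (k : Int) then cnt a.toNat else 0 := by
  induction k with
  | zero => simp [buildDesc]
  | succ k ih =>
      rw [buildDesc, List.count_append, ih, List.count_replicate]
      by_cases hak : a = (k : Int)
      · subst hak
        rw [if_pos (by simp), if_neg (by omega),
            if_pos ⟨by positivity, by push_cast; omega⟩]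
        simp [Int.toNat_natCast]
      · rw [if_neg (by simp; omega)]
        by_cases hlt : 0 ≤ a ∧ a < (k : Int)
        · rw [if_pos hlt, if_pos ⟨hlt.1, by push_cast; omega⟩]; simp
        · rw [if_neg hlt]
          rw [if_neg (fun h => hlt ⟨h.1, by omega⟩)]

-- B's inner loop: repeated answer = answer*10 + d is Horner on a replicate
theorem foldl_const_horner {β : Type} (l : List β) (d a : Int) :
    l.foldl (fun a _ => a * 10 + d) a = horner (List.replicate l.length d) a := by
  induction l generalizing a with
  | nil => simp [horner]
  | cons x t ih => simp only [List.foldl_cons, List.length_cons, List.replicate_succ]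
                   rw [ih]; rfl

theorem inner_fold (c : Int) (d a : Int) :
    (PySem.List.pyRange 0 c 1).foldl (fun a _ => a * 10 + d) a
      = horner (List.replicate c.toNat d) a := by
  rw [foldl_const_horner, PySem.List.length_pyRange_one]
  simp

-- B's outer loop builds the descending bucket concatenation
theorem outer_fold (cnt : Int -> Nat) (k : Nat) (a : Int) :
    (PySem.List.pyRange ((k : Int) - 1) (-1) (-1)).foldl
        (fun a d => horner (List.replicate (cnt d) d) a) a
      = horner (buildDesc (fun j => cnt ((j : Nat) : Int)) k) a := by
  induction k generalizing a with
  | zero => rw [PySem.List.pyRange_neg_one_eq_nil (by omega)]; simp [buildDesc, horner]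
  | succ k ih =>
      rw [show ((k + 1 : Nat) : Int) - 1 = (k : Int) from by push_cast; ring,
          PySem.List.pyRange_neg_one_cons (by omega), List.foldl_cons, ih,
          buildDesc, horner_append]


-- A's value: Horner of the reverse of the ascending sort of the digit list
theorem A_eval (n : Int) :
    solution n = horner ((PySem.List.sorted ((PySem.Int.toChars n).map digitVal)
      (fun x => x) false).reverse) 0 := by
  show (List.foldl _ 0 _) = _
  rw [PySem.List.foldl_append_singleton_eq_map, List.nil_append,
      show (fun c => (PySem.Int.ofChars? [c]).getD 0) = digitVal from rfl]
  rw [PySem.List.len_eq, PySem.List.pyRange_one]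
  simp only [Int.sub_zero, Int.toNat_natCast, List.foldl_map, zero_add,
    PySem.List.pyGetD_natCast]
  exact sum_eq_horner_reverse _

-- B's value: Horner of the descending bucket concatenation
theorem B_eval (n : Int) :
    solution_alt n = horner (buildDesc
      (fun j => ((PySem.Int.toChars n).map digitVal).count ((j : Nat) : Int)) 10) 0 := by
  show (List.foldl _ 0 _) = _
  rw [show (fun (counts : List Int) (c : Char) =>
        PySem.List.pySetD counts ((PySem.Int.ofChars? [c]).getD 0)
          (PySem.List.pyGetD counts ((PySem.Int.ofChars? [c]).getD 0) 0 + 1))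
      = (fun (counts : List Int) (c : Char) =>
        PySem.List.pySetD counts (digitVal c)
          (PySem.List.pyGetD counts (digitVal c) 0 + 1)) from rfl,
      show (PySem.Int.toChars n).foldl
          (fun (counts : List Int) (c : Char) =>
            PySem.List.pySetD counts (digitVal c) (PySem.List.pyGetD counts (digitVal c) 0 + 1))
          (List.replicate 10 (0 : Int))
        = ((PySem.Int.toChars n).map digitVal).foldl
          (fun (counts : List Int) (d : Int) =>
            PySem.List.pySetD counts d (PySem.List.pyGetD counts d 0 + 1))
          (List.replicate 10 (0 : Int)) from
        (@List.foldl_map Char Int (List Int) digitVal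
          (fun counts d => PySem.List.pySetD counts d (PySem.List.pyGetD counts d 0 + 1))
          (PySem.Int.toChars n) (List.replicate 10 (0 : Int))).symm]
  set ds := (PySem.Int.toChars n).map digitVal with hds
  set counts := ds.foldl
    (fun counts d => PySem.List.pySetD counts d (PySem.List.pyGetD counts d 0 + 1))
    (List.replicate 10 (0 : Int)) with hcounts
  rcases counts_spec ds (ds_bound n) (List.replicate 10 (0 : Int)) (by simp) with ⟨hlen, hget⟩
  have hcg : ∀ d : Int, 0 ≤ d → d < 10 →
      PySem.List.pyGetD counts d 0 = ((ds.count d : Nat) : Int) := by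
    intro d h0 h1
    rw [PySem.List.pyGetD_eq_getElem counts 0 h0 (by rw [hlen]; exact_mod_cast h1),
        ← List.getD_eq_getElem _ 0 (by rw [hlen]; omega), hget d.toNat (by omega)]
    have h2 : ((d.toNat : Nat) : Int) = d := by omega
    have h3 : (List.replicate 10 (0 : Int)).getD d.toNat 0 = 0 := by
      rw [List.getD_eq_getElem _ 0 (by simpa using (by omega : d.toNat < 10)),
          List.getElem_replicate]
    rw [h3, h2, zero_add]
  have hbody : (PySem.List.pyRange 9 (-1) (-1)).foldl
      (fun answer d => (PySem.List.pyRange 0 (PySem.List.pyGetD counts d 0) 1).foldl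
        (fun answer _ => answer * 10 + d) answer) 0
      = (PySem.List.pyRange 9 (-1) (-1)).foldl
        (fun a d => horner (List.replicate (ds.count d) d) a) 0 := by
    refine PySem.List.foldl_congr_mem _ _ _ _ ?_
    intro acc d hd
    have hmem := PySem.List.mem_pyRange_neg_one.mp hd
    rw [hcg d (by omega) (by omega), inner_fold]
    simp
  rw [hbody, show (9 : Int) = ((10 : Nat) : Int) - 1 from by norm_num,
      outer_fold (fun d => ds.count d) 10 0]

-- the reverse of the ascending sort is exactly the descending bucket concatenation
theorem lists_eq (ds : List Int) (h : ∀ x ∈ ds, 0 ≤ x ∧ x < 10) :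
    (PySem.List.sorted ds (fun x => x) false).reverse
      = buildDesc (fun j => ds.count ((j : Nat) : Int)) 10 := by
  refine List.Perm.eq_of_pairwise (fun a b _ _ hab hba => le_antisymm hba hab) ?_ ?_ ?_
  · exact List.pairwise_reverse.mpr (PySem.List.sorted_pairwise ds (fun x => x))
  · exact pairwise_buildDesc _ 10
  · refine ((PySem.List.sorted ds (fun x => x) false).reverse_perm.trans
      (PySem.List.sorted_perm ds (fun x => x) false)).trans (List.perm_iff_count.mpr ?_)
    intro a
    rw [count_buildDesc]
    by_cases ha : 0 ≤ a ∧ a < ((10 : Nat) : Int)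
    · rw [if_pos ha, show ((a.toNat : Nat) : Int) = a from by omega]
    · rw [if_neg ha]
      exact List.count_eq_zero.mpr (fun hmem => ha ⟨(h a hmem).1, (h a hmem).2⟩)

-- ===== VERDICT (by name: the statement is the Claim_ definition above) =====
theorem solution_spec : Claim_equal_solution := by
  intro n _ _
  unfold Spec_solution
  rw [A_eval, B_eval, lists_eq _ (ds_bound n)]
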